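-- pv_equiv track=rewrite | github.com/malrangcow00/Computer-Science | Computational-Thinking/Python/Programmers/86052_빛의 경로 사이클.py | solution
-- ===== SOURCE A (Python) =====
-- def solution(grid):
--     answer = []
--     width, height = len(grid[0]), len(grid)
--
--     dy = (-1, 0, 1, 0)
--     dx = (0, 1, 0, -1)
--
--     visited = [[[False] * 4 for _ in range(width)] for _ in range(height)]
--
--     for y in range(height):
--         for x in range(width):
--             for i in range(4):
--                 if not visited[y][x][i]:
--                     # 이동 횟수
--                     cnt = 0
--                     nx, ny = x, y
--                     while not visited[ny][nx][i]:
--                         visited[ny][nx][i] = True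
--                         cnt += 1
--                         if grid[ny][nx] == "L":
--                             i = (i - 1) % 4
--                         elif grid[ny][nx] == "R":
--                             i = (i + 1) % 4
--
--                         # 격자 밖으로 나가면 ...
--                         ny = (ny + dy[i]) % height
--                         nx = (nx + dx[i]) % width
--                     answer.append(cnt)
--     answer.sort()
--     return answer
-- ===== SOURCE B (Python) =====
-- def solution(grid):
--     height, width = len(grid), len(grid[0])
--     n = 4 * width * height
--
--     dy = (-1, 0, 1, 0)
--     dx = (0, 1, 0, -1)
--
--     def step(s):
--         i = s % 4
--         x = (s // 4) % width
--         y = s // (4 * width)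
--         c = grid[y][x]
--         if c == "L":
--             i = (i - 1) % 4
--         elif c == "R":
--             i = (i + 1) % 4
--         return (((y + dy[i]) % height) * width + ((x + dx[i]) % width)) * 4 + i
--
--     # Cycle-leader enumeration: the transition is a permutation of the state
--     # space, so each cycle is reported exactly once, at its minimal state id,
--     # by walking it with no visited structure and abandoning the walk as soon
--     # as a smaller id appears.
--     answer = []
--     for s in range(n):
--         t, length = step(s), 1
--         while t > s:
--             t, length = step(t), length + 1
--         if t == s:
--             answer.append(length)
--     answer.sort()
--     return answer
-- ===== Notes on version B (the rewrite author's own statement) =====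
-- stated objective: alternative
-- what changed: A does a mark-and-sweep cycle decomposition over a 3-D visited array; B keeps no visited structure at all: since the light transition is a permutation of the 4*W*H states, B enumerates each cycle exactly once by the cycle-leader technique (walk from each state, abandon as soon as a smaller id appears, report the length only when the walk returns to its start), trading extra walking time for O(1) bookkeeping space.
-- outside the precondition, e.g. on solution([]): A raises IndexError, B raises IndexError; on solution(['LR', 'S']): A raises IndexError, B raises IndexError
import Mathlib
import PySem

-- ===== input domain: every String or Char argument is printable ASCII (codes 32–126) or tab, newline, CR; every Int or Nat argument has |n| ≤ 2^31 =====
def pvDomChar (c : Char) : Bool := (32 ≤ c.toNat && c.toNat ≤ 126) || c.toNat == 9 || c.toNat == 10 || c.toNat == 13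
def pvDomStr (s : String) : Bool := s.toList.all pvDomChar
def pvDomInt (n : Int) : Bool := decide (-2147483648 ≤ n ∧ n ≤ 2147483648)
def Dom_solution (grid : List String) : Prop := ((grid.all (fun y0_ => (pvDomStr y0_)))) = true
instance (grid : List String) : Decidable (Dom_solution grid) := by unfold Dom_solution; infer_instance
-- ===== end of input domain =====

-- B drops A's 3-D visited array: the light transition is a permutation of the 4*W*H states,
-- so B enumerates each cycle once by the cycle-leader technique (walk, abandon on a smaller id);
-- same return value, neither program mutates its argument.

-- ===== PORT A =====
-- dy/dx tuples and the grid-character access, shared verbatim by both Pythons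
def pvDy : List Int := [-1, 0, 1, 0]
def pvDx : List Int := [0, 1, 0, -1]
def pvCharAt (grid : List String) (y x : Nat) : Char := ((grid.getD y "").toList).getD x ' '

-- A's inner `while not visited[ny][nx][i]` loop (fuel makes it total; 4*W*H+1 always suffices)
def pvWalkA (grid : List String) (height width : Nat) :
    Nat → List (List (List Bool)) → Int → Int → Int → Int → List (List (List Bool)) × Int
  | 0, V, _, _, _, cnt => (V, cnt)
  | fuel+1, V, ny, nx, i, cnt =>
    if ((V.getD ny.toNat []).getD nx.toNat []).getD i.toNat false then (V, cnt)
    else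
      let V' := V.modify ny.toNat (fun row => row.modify nx.toNat (fun cell => cell.set i.toNat true))
      let ch := pvCharAt grid ny.toNat nx.toNat
      let i' := if ch = 'L' then PySem.Int.mod (i - 1) 4 else if ch = 'R' then PySem.Int.mod (i + 1) 4 else i
      let ny' := PySem.Int.mod (ny + pvDy.getD i'.toNat 0) (height : Int)
      let nx' := PySem.Int.mod (nx + pvDx.getD i'.toNat 0) (width : Int)
      pvWalkA grid height width fuel V' ny' nx' i' (cnt + 1)

def solution (grid : List String) : List Int :=
  let width := (grid.headD "").toList.length
  let height := grid.length
  let V0 := List.replicate height (List.replicate width (List.replicate 4 false))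
  let res := (List.range height).foldl (fun st y =>
      (List.range width).foldl (fun st x =>
        (List.range 4).foldl (fun st i =>
          if ((st.1.getD y []).getD x []).getD i false then st
          else
            let w := pvWalkA grid height width (4 * width * height + 1) st.1 (y : Int) (x : Int) (i : Int) 0
            (w.1, st.2 ++ [w.2])) st) st) (V0, ([] : List Int))
  PySem.List.sorted res.2 (fun v => v) false

-- ===== PORT B =====
-- B's local `step(s)`: decode the flat id, turn, move, re-encode
def pvStep (grid : List String) (height width : Nat) (s : Int) : Int :=
  let i : Int := PySem.Int.mod s 4
  let x : Int := PySem.Int.mod (PySem.Int.floordiv s 4) (width : Int)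
  let y : Int := PySem.Int.floordiv s (4 * (width : Int))
  let ch := pvCharAt grid y.toNat x.toNat
  let i' := if ch = 'L' then PySem.Int.mod (i - 1) 4 else if ch = 'R' then PySem.Int.mod (i + 1) 4 else i
  ((PySem.Int.mod (y + pvDy.getD i'.toNat 0) (height : Int)) * (width : Int)
    + PySem.Int.mod (x + pvDx.getD i'.toNat 0) (width : Int)) * 4 + i'

-- B's `while t > s` loop (fuel makes it total; n always suffices since cycles have length ≤ n)
def pvLeadWalk (grid : List String) (height width : Nat) (s : Int) :
    Nat → Int → Int → Int × Int
  | 0, t, len => (t, len)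
  | fuel+1, t, len =>
    if s < t then pvLeadWalk grid height width s fuel (pvStep grid height width t) (len + 1)
    else (t, len)

def solution_alt (grid : List String) : List Int :=
  let height := grid.length
  let width := (grid.headD "").toList.length
  let n := 4 * width * height
  let answer := (List.range n).foldl (fun ans (s : Nat) =>
      let w := pvLeadWalk grid height width (s : Int) n (pvStep grid height width (s : Int)) 1
      if w.1 = (s : Int) then ans ++ [w.2] else ans) ([] : List Int)
  PySem.List.sorted answer (fun v => v) false

-- ===== PRECONDITION & SPEC =====
-- Pre_ excludes exactly the inputs where Python A raises: grid == [] (IndexError on grid[0])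
-- and grids with a row shorter than row 0 (IndexError on grid[ny][nx]).
def Pre_solution (grid : List String) : Prop :=
  grid ≠ [] ∧ ∀ s ∈ grid, (grid.headD "").toList.length ≤ s.toList.length
instance (grid : List String) : Decidable (Pre_solution grid) := by unfold Pre_solution; infer_instance
def pvWitness_solution : List String := ["SL", "LR"]

def Spec_solution (grid : List String) (out : List Int) : Prop := out = solution_alt grid
instance (grid : List String) (out : List Int) : Decidable (Spec_solution grid out) := by unfold Spec_solution; infer_instance

-- ===== CLAIM (what is proved, stated in full; the proofs are below) =====
def Claim_equal_solution : Prop := ∀ (grid : List String), Dom_solution grid → Pre_solution grid → Spec_solution grid (solution grid)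

-- ===== LEMMAS AND PROOFS =====

-- ---------- flat encoding ----------
def pvEnc (W y x i : Nat) : Nat := (y * W + x) * 4 + i

lemma pvEnc_lt {H W y x i : Nat} (hy : y < H) (hx : x < W) (hi : i < 4) :
    pvEnc W y x i < 4 * W * H := by
  unfold pvEnc; nlinarith

lemma pvEnc_inj {W y x i a b c : Nat} (hx : x < W) (hi : i < 4) (hb : b < W) (hc : c < 4)
    (h : pvEnc W y x i = pvEnc W a b c) : y = a ∧ x = b ∧ i = c := by
  unfold pvEnc at h
  have h1 : y * W + x = a * W + b ∧ i = c := by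
    have := h; omega
  obtain ⟨h2, h3⟩ := h1
  have hy : y = a := by
    rcases Nat.lt_trichotomy y a with hlt | he | hgt
    · nlinarith
    · exact he
    · nlinarith
  subst hy
  exact ⟨rfl, by omega, h3⟩

lemma pvEnc_surj {W H s : Nat} (hs : s < 4 * W * H) :
    ∃ y x i, y < H ∧ x < W ∧ i < 4 ∧ s = pvEnc W y x i := by
  have hW : 0 < W := by
    rcases Nat.eq_zero_or_pos W with h | h
    · subst h; simp at hs
    · exact h
  have h4 : (0:Nat) < 4 := by norm_num
  have h1 : s / 4 < W * H := by
    rw [Nat.div_lt_iff_lt_mul h4]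
    calc s < 4 * W * H := hs
    _ = W * H * 4 := by ring
  refine ⟨(s / 4) / W, (s / 4) % W, s % 4, ?_, Nat.mod_lt _ hW, Nat.mod_lt _ h4, ?_⟩
  · rw [Nat.div_lt_iff_lt_mul hW]
    calc s / 4 < W * H := h1
    _ = H * W := by ring
  · have e2 : (s / 4) / W * W + (s / 4) % W = s / 4 := by
      rw [Nat.mul_comm]; exact Nat.div_add_mod _ _
    show s = ((s / 4) / W * W + (s / 4) % W) * 4 + s % 4
    rw [e2]; omega

-- ---------- intermediate flat mark-and-sweep machine (proof-side only) ----------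
def pvWalkF (nxt : List Int) : Nat → List Bool → Int → Int → List Bool × Int
  | 0, F, _, cnt => (F, cnt)
  | fuel+1, F, t, cnt =>
    if F.getD t.toNat false then (F, cnt)
    else pvWalkF nxt fuel (F.set t.toNat true) (nxt.getD t.toNat 0) (cnt + 1)

def pvFlat (grid : List String) : List Int :=
  let height := grid.length
  let width := (grid.headD "").toList.length
  let n := 4 * width * height
  let nxt := (List.range n).map (fun s : Nat => pvStep grid height width (s : Int))
  let F0 := List.replicate n false
  let res := (List.range n).foldl (fun st s =>
      if st.1.getD s false then st
      else
        let w := pvWalkF nxt (n + 1) st.1 (s : Int) 0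
        (w.1, st.2 ++ [w.2])) (F0, ([] : List Int))
  PySem.List.sorted res.2 (fun v => v) false

-- ---------- A = Flat : visited-grid / flat-array bisimulation ----------
def pvRel (H W : Nat) (V : List (List (List Bool))) (F : List Bool) : Prop :=
  V.length = H ∧ F.length = 4 * W * H ∧
  (∀ y, y < H → (V.getD y []).length = W) ∧
  (∀ y x, y < H → x < W → ((V.getD y []).getD x []).length = 4) ∧
  (∀ y x i, y < H → x < W → i < 4 →
    ((V.getD y []).getD x []).getD i false = F.getD (pvEnc W y x i) false)

lemma pvRel_init (H W : Nat) :
    pvRel H W (List.replicate H (List.replicate W (List.replicate 4 false)))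
      (List.replicate (4 * W * H) false) := by
  refine ⟨by simp, by simp, ?_, ?_, ?_⟩
  · intro y hy; rw [List.getD_replicate _ hy]; simp
  · intro y x hy hx; rw [List.getD_replicate _ hy, List.getD_replicate _ hx]; simp
  · intro y x i hy hx hi
    rw [List.getD_replicate _ hy, List.getD_replicate _ hx, List.getD_replicate _ hi,
      List.getD_replicate _ (pvEnc_lt hy hx hi)]

lemma pvGetD_modify {α : Type} (d : α) (l : List α) (g : α → α) (k y : Nat) (hy : y < l.length) :
    (l.modify k g).getD y d = if k = y then g (l.getD y d) else l.getD y d := by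
  simp [List.getD_eq_getElem?_getD, List.getElem?_modify, List.getElem?_eq_getElem hy]

lemma pvGetD_set {α : Type} (d : α) (l : List α) (v : α) (k y : Nat) (hk : k < l.length) :
    (l.set k v).getD y d = if k = y then v else l.getD y d := by
  simp only [List.getD_eq_getElem?_getD, List.getElem?_set]
  split
  · rename_i h; subst h; simp
  · rfl

lemma pvRel_mark {H W : Nat} {V F} (hR : pvRel H W V F) {a b c : Nat}
    (ha : a < H) (hb : b < W) (hc : c < 4) :
    pvRel H W (V.modify a (fun row => row.modify b (fun cell => cell.set c true)))
      (F.set (pvEnc W a b c) true) := by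
  obtain ⟨hVl, hFl, hrow, hcell, hlook⟩ := hR
  have hencF : pvEnc W a b c < F.length := by rw [hFl]; exact pvEnc_lt ha hb hc
  have hVget : ∀ y, y < H →
      (V.modify a (fun row => row.modify b (fun cell => cell.set c true))).getD y []
        = if a = y then (V.getD y []).modify b (fun cell => cell.set c true) else V.getD y [] := by
    intro y hy
    exact pvGetD_modify _ _ _ _ _ (by omega)
  refine ⟨by simpa using hVl, by simpa using hFl, ?_, ?_, ?_⟩
  · intro y hy
    rw [hVget y hy]
    split
    · rw [List.length_modify]; exact hrow y hy
    · exact hrow y hy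
  · intro y x hy hx
    rw [hVget y hy]
    split
    · rw [pvGetD_modify _ _ _ _ _ (by rw [hrow y hy]; exact hx)]
      split
      · rw [List.length_set]; exact hcell y x hy hx
      · exact hcell y x hy hx
    · exact hcell y x hy hx
  · intro y x i hy hx hi
    have hne : ¬ (a = y ∧ b = x ∧ c = i) → pvEnc W a b c ≠ pvEnc W y x i := by
      intro hor heq
      obtain ⟨e1, e2, e3⟩ := pvEnc_inj hb hc hx hi heq
      tauto
    rw [hVget y hy, pvGetD_set _ _ _ _ _ hencF]
    by_cases hya : a = y
    · rw [if_pos hya]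
      rw [pvGetD_modify _ _ _ _ _ (by rw [hrow y hy]; exact hx)]
      by_cases hxb : b = x
      · rw [if_pos hxb]
        rw [pvGetD_set _ _ _ _ _ (by rw [hcell y x hy hx]; exact hc)]
        by_cases hic : c = i
        · rw [if_pos hic, if_pos (by rw [hya, hxb, hic])]
        · rw [if_neg hic, if_neg (hne (by tauto)), hlook y x i hy hx hi]
      · rw [if_neg hxb, if_neg (hne (by tauto))]
        exact hlook y x i hy hx hi
    · rw [if_neg hya, if_neg (hne (by tauto))]
      exact hlook y x i hy hx hi

-- the direction after the turn, and the next cell, at state (a,b,c), as both ports compute them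
def pvJ (grid : List String) (a b c : Nat) : Int :=
  if pvCharAt grid a b = 'L' then PySem.Int.mod ((c : Int) - 1) 4
  else if pvCharAt grid a b = 'R' then PySem.Int.mod ((c : Int) + 1) 4 else (c : Int)
def pvNy (grid : List String) (H a b c : Nat) : Int :=
  PySem.Int.mod ((a : Int) + pvDy.getD (pvJ grid a b c).toNat 0) (H : Int)
def pvNx (grid : List String) (W a b c : Nat) : Int :=
  PySem.Int.mod ((b : Int) + pvDx.getD (pvJ grid a b c).toNat 0) (W : Int)

lemma pvJ_bounds (grid : List String) {a b c : Nat} (hc : c < 4) :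
    0 ≤ pvJ grid a b c ∧ pvJ grid a b c < 4 := by
  unfold pvJ
  split_ifs <;>
    first
      | exact ⟨PySem.Int.mod_nonneg _ (by norm_num), PySem.Int.mod_lt _ (by norm_num)⟩
      | exact ⟨Int.natCast_nonneg c, by exact_mod_cast hc⟩

lemma pvNy_bounds (grid : List String) {H : Nat} (a b c : Nat) (hH : 0 < H) :
    0 ≤ pvNy grid H a b c ∧ pvNy grid H a b c < (H : Int) :=
  ⟨PySem.Int.mod_nonneg _ (by exact_mod_cast hH), PySem.Int.mod_lt _ (by exact_mod_cast hH)⟩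

lemma pvNx_bounds (grid : List String) {W : Nat} (a b c : Nat) (hW : 0 < W) :
    0 ≤ pvNx grid W a b c ∧ pvNx grid W a b c < (W : Int) :=
  ⟨PySem.Int.mod_nonneg _ (by exact_mod_cast hW), PySem.Int.mod_lt _ (by exact_mod_cast hW)⟩

-- decoding the flat id recovers the state components
lemma pvDecode_i {W a b c : Nat} (hc : c < 4) :
    PySem.Int.mod ((pvEnc W a b c : Nat) : Int) 4 = (c : Int) := by
  rw [PySem.Int.mod_eq_emod_of_pos (by norm_num)]
  unfold pvEnc; push_cast
  generalize ((a : Int) * W + b) = p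
  omega

lemma pvDecode_x {W a b c : Nat} (hb : b < W) (hc : c < 4) :
    PySem.Int.mod (PySem.Int.floordiv ((pvEnc W a b c : Nat) : Int) 4) (W : Int) = (b : Int) := by
  have h1 : PySem.Int.floordiv ((pvEnc W a b c : Nat) : Int) 4 = ((a * W + b : Nat) : Int) := by
    rw [PySem.Int.floordiv_eq_ediv_of_pos (by norm_num)]
    unfold pvEnc; push_cast
    generalize ((a : Int) * W + b) = p
    omega
  rw [h1, PySem.Int.mod_natCast]
  have h2 : (a * W + b) % W = b := by
    rw [Nat.add_comm, Nat.add_mul_mod_self_right]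
    exact Nat.mod_eq_of_lt hb
  rw [h2]

lemma pvDecode_y {W a b c : Nat} (hb : b < W) (hc : c < 4) :
    PySem.Int.floordiv ((pvEnc W a b c : Nat) : Int) (4 * (W : Int)) = (a : Int) := by
  have hW : (0:Int) < (W:Int) := by exact_mod_cast Nat.pos_of_ne_zero (by omega)
  rw [PySem.Int.floordiv_eq_ediv_of_pos (by linarith)]
  unfold pvEnc
  have hrw : (((a * W + b) * 4 + c : Nat) : Int) = ((b:Int)*4 + (c:Int)) + (a:Int) * (4 * (W:Int)) := by
    push_cast; ring
  rw [hrw, Int.add_mul_ediv_right _ _ (by linarith)]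
  have h0 : ((b:Int)*4 + (c:Int)) / (4 * (W:Int)) = 0 := by
    apply Int.ediv_eq_zero_of_lt (by positivity)
    have hb2 : (b:Int) < W := by exact_mod_cast hb
    have hc2 : (c:Int) < 4 := by exact_mod_cast hc
    nlinarith
  rw [h0]; ring

-- the step applied at an encoded state is A's transition at that state
lemma pvStep_decode (grid : List String) {H W : Nat} {a b c : Nat}
    (hb : b < W) (hc : c < 4) :
    pvStep grid H W ((pvEnc W a b c : Nat) : Int)
      = ((pvNy grid H a b c * (W : Int) + pvNx grid W a b c) * 4 + pvJ grid a b c) := by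
  unfold pvStep
  rw [pvDecode_i hc, pvDecode_x hb hc, pvDecode_y hb hc]
  rfl

lemma pvWalkA_stop (grid : List String) (H W fuel : Nat) (V) (a b c : Nat) (cnt : Int)
    (hv : ((V.getD a []).getD b []).getD c false = true) :
    pvWalkA grid H W (fuel+1) V (a : Int) (b : Int) (c : Int) cnt = (V, cnt) := by
  simp only [pvWalkA, Int.toNat_natCast, hv, if_true]

lemma pvWalkA_step (grid : List String) (H W fuel : Nat) (V) (a b c : Nat) (cnt : Int)
    (hv : ((V.getD a []).getD b []).getD c false = false) :
    pvWalkA grid H W (fuel+1) V (a : Int) (b : Int) (c : Int) cnt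
      = pvWalkA grid H W fuel
          (V.modify a (fun row => row.modify b (fun cell => cell.set c true)))
          (pvNy grid H a b c) (pvNx grid W a b c) (pvJ grid a b c) (cnt + 1) := by
  simp only [pvWalkA, Int.toNat_natCast, hv, Bool.false_eq_true, if_false]
  rfl

lemma pvWalkF_stop (nxt : List Int) (fuel : Nat) (F : List Bool) (e : Nat) (cnt : Int)
    (hv : F.getD e false = true) :
    pvWalkF nxt (fuel+1) F ((e : Nat) : Int) cnt = (F, cnt) := by
  simp only [pvWalkF, Int.toNat_natCast, hv, if_true]

lemma pvWalkF_step (nxt : List Int) (fuel : Nat) (F : List Bool) (e : Nat) (cnt : Int)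
    (hv : F.getD e false = false) :
    pvWalkF nxt (fuel+1) F ((e : Nat) : Int) cnt
      = pvWalkF nxt fuel (F.set e true) (nxt.getD e 0) (cnt + 1) := by
  simp only [pvWalkF, Int.toNat_natCast, hv, Bool.false_eq_true, if_false]

-- walk bisimulation: same count, invariant preserved
lemma pvWalk_rel (grid : List String) (H W : Nat) (nxt : List Int)
    (hnxt : nxt = (List.range (4 * W * H)).map (fun s : Nat => pvStep grid H W (s : Int))) :
    ∀ fuel V F (a b c : Nat) (cnt : Int), a < H → b < W → c < 4 → pvRel H W V F →
      (pvWalkA grid H W fuel V (a : Int) (b : Int) (c : Int) cnt).2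
          = (pvWalkF nxt fuel F ((pvEnc W a b c : Nat) : Int) cnt).2
        ∧ pvRel H W (pvWalkA grid H W fuel V (a : Int) (b : Int) (c : Int) cnt).1
            (pvWalkF nxt fuel F ((pvEnc W a b c : Nat) : Int) cnt).1 := by
  intro fuel
  induction fuel with
  | zero =>
    intro V F a b c cnt ha hb hc hR
    exact ⟨rfl, hR⟩
  | succ fuel ih =>
    intro V F a b c cnt ha hb hc hR
    have hH : 0 < H := by omega
    have hW : 0 < W := by omega
    have hcond : ((V.getD a []).getD b []).getD c false = F.getD (pvEnc W a b c) false :=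
      hR.2.2.2.2 a b c ha hb hc
    by_cases hv : F.getD (pvEnc W a b c) false = true
    · rw [pvWalkA_stop grid H W fuel V a b c cnt (by rw [hcond]; exact hv),
        pvWalkF_stop nxt fuel F _ cnt hv]
      exact ⟨rfl, hR⟩
    · have hv' : F.getD (pvEnc W a b c) false = false := by
        cases h : F.getD (pvEnc W a b c) false
        · rfl
        · exact absurd h hv
      rw [pvWalkA_step grid H W fuel V a b c cnt (by rw [hcond]; exact hv'),
        pvWalkF_step nxt fuel F _ cnt hv']
      have hlk : nxt.getD (pvEnc W a b c) 0
          = (pvNy grid H a b c * (W : Int) + pvNx grid W a b c) * 4 + pvJ grid a b c := by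
        rw [hnxt, PySem.List.getD_map_range _ _ _ _ (pvEnc_lt ha hb hc)]
        exact pvStep_decode grid hb hc
      obtain ⟨hy0, hy1⟩ := pvNy_bounds grid (H := H) a b c hH
      obtain ⟨hx0, hx1⟩ := pvNx_bounds grid (W := W) a b c hW
      obtain ⟨hj0, hj1⟩ := pvJ_bounds grid (a := a) (b := b) hc
      have hyc : (((pvNy grid H a b c).toNat : Nat) : Int) = pvNy grid H a b c :=
        Int.toNat_of_nonneg hy0
      have hxc : (((pvNx grid W a b c).toNat : Nat) : Int) = pvNx grid W a b c :=
        Int.toNat_of_nonneg hx0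
      have hjc : (((pvJ grid a b c).toNat : Nat) : Int) = pvJ grid a b c :=
        Int.toNat_of_nonneg hj0
      have hlk2 : nxt.getD (pvEnc W a b c) 0
          = ((pvEnc W (pvNy grid H a b c).toNat (pvNx grid W a b c).toNat
              (pvJ grid a b c).toNat : Nat) : Int) := by
        rw [hlk]
        unfold pvEnc
        push_cast
        rw [hyc, hxc, hjc]
      rw [hlk2, ← hyc, ← hxc, ← hjc]
      exact ih _ _ _ _ _ _
        (by omega) (by omega) (by omega)
        (pvRel_mark ⟨hR.1, hR.2.1, hR.2.2.1, hR.2.2.2.1, hR.2.2.2.2⟩ ha hb hc)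

-- generic paired fold with an invariant
lemma pvFoldl_rel {σ τ : Type} (R : σ → τ → Prop) (f : σ → Nat → σ) (g : τ → Nat → τ) :
    ∀ (l : List Nat) (s : σ) (t : τ),
      (∀ k ∈ l, ∀ s t, R s t → R (f s k) (g t k)) → R s t → R (l.foldl f s) (l.foldl g t) := by
  intro l
  induction l with
  | nil => intro s t _ h; exact h
  | cons k l ih =>
    intro s t hstep h
    exact ih (f s k) (g t k) (fun k' hk' => hstep k' (List.mem_cons_of_mem _ hk'))
      (hstep k (List.mem_cons_self ..) s t h)

lemma pvRange_mul (a b : Nat) :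
    List.range (a * b) = (List.range a).flatMap (fun k => (List.range b).map (fun j => k * b + j)) := by
  induction a with
  | zero => simp
  | succ a ih =>
    rw [List.range_succ, Nat.succ_mul, List.range_add, ih, List.flatMap_append]
    simp

lemma pvFoldl_range_mul {σ : Type} (g : σ → Nat → σ) (a b : Nat) (s : σ) :
    (List.range (a * b)).foldl g s
      = (List.range a).foldl (fun st k => (List.range b).foldl (fun st j => g st (k * b + j)) st) s := by
  rw [pvRange_mul, List.foldl_flatMap]
  simp [List.foldl_map]

lemma pvFoldl_range_4WH {σ : Type} (g : σ → Nat → σ) (H W : Nat) (s : σ) :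
    (List.range (4 * W * H)).foldl g s
      = (List.range H).foldl (fun st y =>
          (List.range W).foldl (fun st x =>
            (List.range 4).foldl (fun st i => g st (pvEnc W y x i)) st) st) s := by
  have h1 : 4 * W * H = H * (W * 4) := by ring
  rw [h1, pvFoldl_range_mul]
  have h2 : ∀ (st : σ) (k : Nat), (List.range (W * 4)).foldl (fun st j => g st (k * (W * 4) + j)) st
      = (List.range W).foldl (fun st x =>
          (List.range 4).foldl (fun st i => g st (pvEnc W k x i)) st) st := by
    intro st k
    rw [pvFoldl_range_mul]
    have h3 : ∀ (x i : Nat), k * (W * 4) + (x * 4 + i) = pvEnc W k x i := by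
      intro x i; unfold pvEnc; ring
    simp only [h3]
  simp only [h2]

lemma pvA_eq_flat (grid : List String) : solution grid = pvFlat grid := by
  show solution grid = pvFlat grid
  unfold solution pvFlat
  dsimp only
  rw [pvFoldl_range_4WH]
  refine congrArg (fun l => PySem.List.sorted l (fun v => v) false) ?_
  refine (pvFoldl_rel
    (R := fun (sA : List (List (List Bool)) × List Int) (sB : List Bool × List Int) =>
      pvRel grid.length ((grid.headD "").toList.length) sA.1 sB.1 ∧ sA.2 = sB.2)
    _ _ (List.range grid.length) _ _ ?_ ⟨pvRel_init _ _, rfl⟩).2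
  intro y hy sA sB hR
  refine pvFoldl_rel (R := fun (sA : List (List (List Bool)) × List Int) (sB : List Bool × List Int) =>
      pvRel grid.length ((grid.headD "").toList.length) sA.1 sB.1 ∧ sA.2 = sB.2) _ _ (List.range ((grid.headD "").toList.length)) sA sB ?_ hR
  intro x hx sA sB hR
  refine pvFoldl_rel (R := fun (sA : List (List (List Bool)) × List Int) (sB : List Bool × List Int) =>
      pvRel grid.length ((grid.headD "").toList.length) sA.1 sB.1 ∧ sA.2 = sB.2) _ _ (List.range 4) sA sB ?_ hR
  intro i hi sA sB hR
  have hy' := List.mem_range.mp hy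
  have hx' := List.mem_range.mp hx
  have hi' := List.mem_range.mp hi
  obtain ⟨hrel, hans⟩ := hR
  have hcond := hrel.2.2.2.2 y x i hy' hx' hi'
  by_cases hv : sB.1.getD (pvEnc ((grid.headD "").toList.length) y x i) false = true
  · simp only [hcond, hv, if_true]
    exact ⟨hrel, hans⟩
  · have hv' : sB.1.getD (pvEnc ((grid.headD "").toList.length) y x i) false = false := by
      cases h : sB.1.getD (pvEnc ((grid.headD "").toList.length) y x i) false
      · rfl
      · exact absurd h hv
    simp only [hcond, hv', Bool.false_eq_true, if_false]
    obtain ⟨hcnt, hrel'⟩ := pvWalk_rel grid grid.length ((grid.headD "").toList.length) _ rfl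
      (4 * ((grid.headD "").toList.length) * grid.length + 1) sA.1 sB.1 y x i 0 hy' hx' hi' hrel
    exact ⟨hrel', by rw [hans, hcnt]⟩

-- ---------- the transition as a Nat function, its inverse, and permutation facts ----------
def pvF (grid : List String) (H W : Nat) (s : Nat) : Nat := (pvStep grid H W (s : Int)).toNat

def pvG (grid : List String) (H W : Nat) (t : Nat) : Nat :=
  let j := t % 4
  let b := (t / 4) % W
  let a := t / (4 * W)
  let y := (((a : Int) - pvDy.getD j 0) % (H : Int)).toNat
  let x := (((b : Int) - pvDx.getD j 0) % (W : Int)).toNat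
  let c := pvCharAt grid y x
  let i := if c = 'L' then (j + 1) % 4 else if c = 'R' then (j + 3) % 4 else j
  pvEnc W y x i

-- Nat-side decodes of the flat id
lemma pvEncN_mod4 {W a b c : Nat} (hc : c < 4) : pvEnc W a b c % 4 = c := by
  unfold pvEnc; omega

lemma pvEncN_div4modW {W a b c : Nat} (hb : b < W) (hc : c < 4) :
    pvEnc W a b c / 4 % W = b := by
  have h1 : pvEnc W a b c / 4 = a * W + b := by unfold pvEnc; omega
  rw [h1, Nat.add_comm, Nat.add_mul_mod_self_right]
  exact Nat.mod_eq_of_lt hb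

lemma pvEncN_div4W {W a b c : Nat} (hW : 0 < W) (hb : b < W) (hc : c < 4) :
    pvEnc W a b c / (4 * W) = a := by
  have h1 : pvEnc W a b c = (4 * W) * a + (b * 4 + c) := by unfold pvEnc; ring
  rw [h1, Nat.mul_add_div (by omega)]
  have h2 : (b * 4 + c) / (4 * W) = 0 := Nat.div_eq_of_lt (by omega)
  omega

-- undoing a shifted modulus
lemma pvUnshift (y d h : Int) (h0 : 0 ≤ y) (h1 : y < h) : ((y + d) % h - d) % h = y := by
  calc ((y + d) % h - d) % h = ((y + d) % h % h - d % h) % h := by rw [Int.sub_emod]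
  _ = ((y + d) % h - d % h) % h := by rw [Int.emod_emod_of_dvd _ dvd_rfl]
  _ = ((y + d) - d) % h := by rw [← Int.sub_emod]
  _ = y % h := by ring_nf
  _ = y := Int.emod_eq_of_lt h0 h1

lemma pvF_enc (grid : List String) {H W y x i : Nat} (hH : 0 < H) (hW : 0 < W)
    (hy : y < H) (hx : x < W) (hi : i < 4) :
    pvF grid H W (pvEnc W y x i)
      = pvEnc W (pvNy grid H y x i).toNat (pvNx grid W y x i).toNat (pvJ grid y x i).toNat := by
  obtain ⟨hy0, hy1⟩ := pvNy_bounds grid (H := H) y x i hH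
  obtain ⟨hx0, hx1⟩ := pvNx_bounds grid (W := W) y x i hW
  obtain ⟨hj0, hj1⟩ := pvJ_bounds grid (a := y) (b := x) hi
  unfold pvF
  rw [pvStep_decode grid hx hi]
  have h1 : (pvNy grid H y x i * (W : Int) + pvNx grid W y x i) * 4 + pvJ grid y x i
      = ((pvEnc W (pvNy grid H y x i).toNat (pvNx grid W y x i).toNat
          (pvJ grid y x i).toNat : Nat) : Int) := by
    unfold pvEnc
    push_cast
    rw [Int.toNat_of_nonneg hy0, Int.toNat_of_nonneg hx0, Int.toNat_of_nonneg hj0]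
  rw [h1, Int.toNat_natCast]

lemma pvStep_cast (grid : List String) {H W : Nat} {s : Nat} (hs : s < 4 * W * H) :
    pvStep grid H W (s : Int) = ((pvF grid H W s : Nat) : Int) := by
  have hW : 0 < W := by
    rcases Nat.eq_zero_or_pos W with h | h
    · subst h; simp at hs
    · exact h
  have hH : 0 < H := by
    rcases Nat.eq_zero_or_pos H with h | h
    · subst h; simp at hs
    · exact h
  obtain ⟨y, x, i, hy, hx, hi, rfl⟩ := pvEnc_surj hs
  obtain ⟨hy0, hy1⟩ := pvNy_bounds grid (H := H) y x i hH
  obtain ⟨hx0, hx1⟩ := pvNx_bounds grid (W := W) y x i hW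
  obtain ⟨hj0, hj1⟩ := pvJ_bounds grid (a := y) (b := x) hi
  have hnn : 0 ≤ pvStep grid H W ((pvEnc W y x i : Nat) : Int) := by
    rw [pvStep_decode grid hx hi]
    have hWnn : (0:Int) ≤ (W : Int) := Int.natCast_nonneg W
    nlinarith
  unfold pvF
  rw [Int.toNat_of_nonneg hnn]

lemma pvF_lt (grid : List String) {H W : Nat} {s : Nat} (hs : s < 4 * W * H) :
    pvF grid H W s < 4 * W * H := by
  have hW : 0 < W := by
    rcases Nat.eq_zero_or_pos W with h | h
    · subst h; simp at hs
    · exact h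
  have hH : 0 < H := by
    rcases Nat.eq_zero_or_pos H with h | h
    · subst h; simp at hs
    · exact h
  obtain ⟨y, x, i, hy, hx, hi, rfl⟩ := pvEnc_surj hs
  rw [pvF_enc grid hH hW hy hx hi]
  obtain ⟨hy0, hy1⟩ := pvNy_bounds grid (H := H) y x i hH
  obtain ⟨hx0, hx1⟩ := pvNx_bounds grid (W := W) y x i hW
  obtain ⟨hj0, hj1⟩ := pvJ_bounds grid (a := y) (b := x) hi
  exact pvEnc_lt (by omega) (by omega) (by omega)

-- the turn is invertible once the cell is known
lemma pvJ_inv (grid : List String) {a b i : Nat} (hi : i < 4) :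
    (if pvCharAt grid a b = 'L' then ((pvJ grid a b i).toNat + 1) % 4
     else if pvCharAt grid a b = 'R' then ((pvJ grid a b i).toNat + 3) % 4
     else (pvJ grid a b i).toNat) = i := by
  unfold pvJ
  by_cases hL : pvCharAt grid a b = 'L'
  · simp only [if_pos hL]
    interval_cases i <;> decide
  · by_cases hR : pvCharAt grid a b = 'R'
    · simp only [if_neg hL, if_pos hR]
      interval_cases i <;> decide
    · simp only [if_neg hL, if_neg hR, Int.toNat_natCast]

lemma pvG_pvF (grid : List String) {H W : Nat} {s : Nat} (hs : s < 4 * W * H) :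
    pvG grid H W (pvF grid H W s) = s := by
  have hW : 0 < W := by
    rcases Nat.eq_zero_or_pos W with h | h
    · subst h; simp at hs
    · exact h
  have hH : 0 < H := by
    rcases Nat.eq_zero_or_pos H with h | h
    · subst h; simp at hs
    · exact h
  obtain ⟨y, x, i, hy, hx, hi, rfl⟩ := pvEnc_surj hs
  obtain ⟨hy0, hy1⟩ := pvNy_bounds grid (H := H) y x i hH
  obtain ⟨hx0, hx1⟩ := pvNx_bounds grid (W := W) y x i hW
  obtain ⟨hj0, hj1⟩ := pvJ_bounds grid (a := y) (b := x) hi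
  rw [pvF_enc grid hH hW hy hx hi]
  have hAH : (pvNy grid H y x i).toNat < H := by omega
  have hBW : (pvNx grid W y x i).toNat < W := by omega
  have hJ4 : (pvJ grid y x i).toNat < 4 := by omega
  unfold pvG
  simp only [pvEncN_mod4 hJ4, pvEncN_div4modW hBW hJ4, pvEncN_div4W hW hBW hJ4]
  have hyrec : ((((pvNy grid H y x i).toNat : Int) - pvDy.getD (pvJ grid y x i).toNat 0) % (H : Int)).toNat = y := by
    rw [Int.toNat_of_nonneg hy0]
    have h2 : pvNy grid H y x i = ((y : Int) + pvDy.getD (pvJ grid y x i).toNat 0) % (H : Int) := by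
      unfold pvNy
      rw [PySem.Int.mod_eq_emod_of_pos (by exact_mod_cast hH)]
    rw [h2, pvUnshift _ _ _ (Int.natCast_nonneg y) (by exact_mod_cast hy), Int.toNat_natCast]
  have hxrec : ((((pvNx grid W y x i).toNat : Int) - pvDx.getD (pvJ grid y x i).toNat 0) % (W : Int)).toNat = x := by
    rw [Int.toNat_of_nonneg hx0]
    have h2 : pvNx grid W y x i = ((x : Int) + pvDx.getD (pvJ grid y x i).toNat 0) % (W : Int) := by
      unfold pvNx
      rw [PySem.Int.mod_eq_emod_of_pos (by exact_mod_cast hW)]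
    rw [h2, pvUnshift _ _ _ (Int.natCast_nonneg x) (by exact_mod_cast hx), Int.toNat_natCast]
  rw [hyrec, hxrec, pvJ_inv grid hi]

lemma pvF_inj (grid : List String) {H W : Nat} {a b : Nat}
    (ha : a < 4 * W * H) (hb : b < 4 * W * H)
    (h : pvF grid H W a = pvF grid H W b) : a = b := by
  rw [← pvG_pvF grid ha, ← pvG_pvF grid hb, h]

-- ---------- abstract cycle theory for an injective self-map of [0, n) ----------
lemma pvIter_lt {f : Nat → Nat} {n : Nat} (hlt : ∀ s, s < n → f s < n) :
    ∀ (k s : Nat), s < n → f^[k] s < n := by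
  intro k
  induction k with
  | zero => intro s hs; simpa using hs
  | succ k ih =>
    intro s hs
    rw [Function.iterate_succ_apply']
    exact hlt _ (ih s hs)

lemma pvIter_cancel {f : Nat → Nat} {n : Nat} (hlt : ∀ s, s < n → f s < n)
    (hinj : ∀ a b, a < n → b < n → f a = f b → a = b) :
    ∀ (k u v : Nat), u < n → v < n → f^[k] u = f^[k] v → u = v := by
  intro k
  induction k with
  | zero => intro u v _ _ h; simpa using h
  | succ k ih =>
    intro u v hu hv h
    rw [Function.iterate_succ_apply, Function.iterate_succ_apply] at h
    exact hinj _ _ hu hv (ih (f u) (f v) (hlt _ hu) (hlt _ hv) h)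

lemma pvPer_ex {f : Nat → Nat} {n : Nat} (hlt : ∀ s, s < n → f s < n)
    (hinj : ∀ a b, a < n → b < n → f a = f b → a = b)
    {s : Nat} (hs : s < n) : ∃ k, 0 < k ∧ f^[k] s = s := by
  have key : ∀ a b : Nat, a < b → f^[a] s = f^[b] s → ∃ k, 0 < k ∧ f^[k] s = s := by
    intro a b hab h
    refine ⟨b - a, by omega, ?_⟩
    have hb : b = a + (b - a) := by omega
    rw [hb, Function.iterate_add_apply] at h
    exact (pvIter_cancel hlt hinj a s (f^[b - a] s) hs (pvIter_lt hlt _ s hs) h).symm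
  obtain ⟨a, b, hne, heq⟩ := Fintype.exists_ne_map_eq_of_card_lt
    (fun k : Fin (n+1) => (⟨f^[(k : Nat)] s, pvIter_lt hlt _ s hs⟩ : Fin n)) (by simp)
  have h' : f^[(a : Nat)] s = f^[(b : Nat)] s := congrArg Fin.val heq
  have hvne : (a : Nat) ≠ (b : Nat) := fun h => hne (Fin.ext h)
  rcases Nat.lt_or_ge (a : Nat) (b : Nat) with hab | hab
  · exact key _ _ hab h'
  · exact key _ _ (by omega) h'.symm

lemma pvIter_mul {f : Nat → Nat} {p s : Nat} (hfix : f^[p] s = s) :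
    ∀ q, f^[p * q] s = s := by
  intro q
  induction q with
  | zero => simp
  | succ q ih =>
    have : p * (q + 1) = p * q + p := by ring
    rw [this, Function.iterate_add_apply, hfix, ih]

lemma pvIter_mod {f : Nat → Nat} {p s : Nat} (hfix : f^[p] s = s) (hp : 0 < p)
    (k : Nat) : f^[k] s = f^[k % p] s := by
  conv_lhs => rw [← Nat.mod_add_div k p]
  rw [Function.iterate_add_apply, pvIter_mul hfix]

def pvReach (f : Nat → Nat) (j u : Nat) : Prop := ∃ k, f^[k] j = u

lemma pvReach_trans {f : Nat → Nat} {a b c : Nat}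
    (h1 : pvReach f a b) (h2 : pvReach f b c) : pvReach f a c := by
  obtain ⟨k, hk⟩ := h1
  obtain ⟨l, hl⟩ := h2
  exact ⟨l + k, by rw [Function.iterate_add_apply, hk, hl]⟩

lemma pvReach_symm {f : Nat → Nat} {n : Nat} (hlt : ∀ s, s < n → f s < n)
    (hinj : ∀ a b, a < n → b < n → f a = f b → a = b)
    {j u : Nat} (hj : j < n) (h : pvReach f j u) : pvReach f u j := by
  obtain ⟨k, hk⟩ := h
  obtain ⟨p, hp, hfix⟩ := pvPer_ex hlt hinj hj
  refine ⟨p * (k + 1) - k, ?_⟩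
  have hge : k ≤ p * (k + 1) := by nlinarith
  rw [← hk, ← Function.iterate_add_apply, Nat.sub_add_cancel hge, pvIter_mul hfix]

lemma pvPer_le {f : Nat → Nat} {n : Nat} (hlt : ∀ s, s < n → f s < n)
    (hinj : ∀ a b, a < n → b < n → f a = f b → a = b)
    {s p : Nat} (hs : s < n) (hp : 0 < p) (hfix : f^[p] s = s)
    (hmin : ∀ j, 0 < j → j < p → f^[j] s ≠ s) : p ≤ n := by
  have key : ∀ a b, a < b → b < p → f^[a] s = f^[b] s → False := by
    intro a b hab hbp h
    have hb : b = a + (b - a) := by omega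
    rw [hb, Function.iterate_add_apply] at h
    have h2 := pvIter_cancel hlt hinj a s (f^[b - a] s) hs (pvIter_lt hlt _ s hs) h
    exact hmin (b - a) (by omega) (by omega) h2.symm
  have hmaps : ∀ a ∈ Finset.range p, f^[a] s ∈ Finset.range n := by
    intro a _
    exact Finset.mem_range.mpr (pvIter_lt hlt _ s hs)
  have hinj' : Set.InjOn (fun k => f^[k] s) ↑(Finset.range p) := by
    intro a ha b hb hab
    simp only [Finset.coe_range, Set.mem_Iio] at ha hb
    by_contra hne
    rcases Nat.lt_or_ge a b with h1 | h1
    · exact key a b h1 hb hab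
    · exact key b a (by omega) ha hab.symm
  have := Finset.card_le_card_of_injOn _ hmaps hinj'
  simpa using this

-- the leader walk returns to its start iff no smaller state lies on the start's cycle
lemma pvKfix_iff {f : Nat → Nat} {n : Nat} (hlt : ∀ s, s < n → f s < n)
    (hinj : ∀ a b, a < n → b < n → f a = f b → a = b)
    {s : Nat} (hs : s < n) (hQex : ∃ j, 0 < j ∧ f^[j] s ≤ s) :
    (f^[Nat.find hQex] s = s) ↔ ¬ ∃ j, j < s ∧ pvReach f s j := by
  have hper := pvPer_ex hlt hinj hs
  have hp0 := (Nat.find_spec hper).1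
  have hpfix := (Nat.find_spec hper).2
  constructor
  · intro hfix
    rintro ⟨j, hjs, k, hk⟩
    have hpK : Nat.find hper ≤ Nat.find hQex :=
      Nat.find_min' hper ⟨(Nat.find_spec hQex).1, hfix⟩
    have hk0 : k % Nat.find hper ≠ 0 := by
      intro h0
      rw [pvIter_mod hpfix hp0, h0] at hk
      simp at hk
      omega
    have hkred : f^[k % Nat.find hper] s = j := by
      rw [← pvIter_mod hpfix hp0]; exact hk
    have hQk : Nat.find hQex ≤ k % Nat.find hper :=
      Nat.find_min' hQex ⟨by omega, by rw [hkred]; omega⟩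
    have : k % Nat.find hper < Nat.find hper := Nat.mod_lt _ hp0
    omega
  · intro hno
    have hle := (Nat.find_spec hQex).2
    rcases Nat.lt_or_ge (f^[Nat.find hQex] s) s with h1 | h1
    · exact absurd ⟨f^[Nat.find hQex] s, h1, ⟨Nat.find hQex, rfl⟩⟩ hno
    · omega

-- ---------- B's leader walk, characterized ----------
lemma pvLeadWalk_spec (grid : List String) (H W n : Nat)
    (f : Nat → Nat) (hstep : ∀ u, u < n → pvStep grid H W ((u : Nat) : Int) = ((f u : Nat) : Int))
    (hlt : ∀ s, s < n → f s < n) (s : Nat) (hs : s < n)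
    (K : Nat) (hK1 : 0 < K) (hKle : f^[K] s ≤ s) (hKmin : ∀ j, 0 < j → j < K → s < f^[j] s) :
    ∀ fuel m, 0 < m → m ≤ K → K - m ≤ fuel →
      pvLeadWalk grid H W (s : Int) fuel ((f^[m] s : Nat) : Int) (m : Int)
        = (((f^[K] s : Nat) : Int), (K : Int)) := by
  intro fuel
  induction fuel with
  | zero =>
    intro m hm0 hmK hfuel
    have hmK' : m = K := by omega
    subst hmK'
    rfl
  | succ fuel ih =>
    intro m hm0 hmK hfuel
    by_cases hmeq : m = K
    · have hguard : ¬ ((s : Int) < ((f^[m] s : Nat) : Int)) := by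
        rw [Int.not_lt]
        exact_mod_cast (hmeq ▸ hKle)
      simp only [pvLeadWalk, if_neg hguard]
      rw [hmeq]
    · have hmK2 : m < K := by omega
      have hguard : (s : Int) < ((f^[m] s : Nat) : Int) := by
        exact_mod_cast hKmin m hm0 hmK2
      rw [show pvLeadWalk grid H W (s : Int) (fuel+1) ((f^[m] s : Nat) : Int) (m : Int)
          = pvLeadWalk grid H W (s : Int) fuel
              (pvStep grid H W ((f^[m] s : Nat) : Int)) ((m : Int) + 1) from by
        simp only [pvLeadWalk, if_pos hguard]]
      rw [hstep _ (pvIter_lt hlt m s hs), ← Function.iterate_succ_apply' f m s]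
      have hc : ((m : Int) + 1) = ((m + 1 : Nat) : Int) := by push_cast; ring
      rw [hc]
      exact ih (m + 1) (by omega) (by omega) (by omega)

-- ---------- the flat walk, characterized ----------
lemma pvWalkF_spec {n : Nat} (f : Nat → Nat) (nxt : List Int)
    (hnxt : ∀ u, u < n → nxt.getD u 0 = ((f u : Nat) : Int))
    (hlt : ∀ s, s < n → f s < n)
    (hinj : ∀ a b, a < n → b < n → f a = f b → a = b)
    (s : Nat) (hs : s < n) (p : Nat) (hp : 0 < p) (hfix : f^[p] s = s)
    (hmin : ∀ j, 0 < j → j < p → f^[j] s ≠ s)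
    (S0 : Nat → Prop) (hS0 : ∀ a, ¬ S0 (f^[a] s)) :
    ∀ fuel k (F : List Bool) (cnt : Int), k ≤ p → p - k < fuel → F.length = n →
      (∀ u, u < n → (F.getD u false = true ↔ (S0 u ∨ ∃ j, j < k ∧ f^[j] s = u))) →
      ∃ F', pvWalkF nxt fuel F ((f^[k] s : Nat) : Int) cnt = (F', cnt + ((p - k : Nat) : Int))
        ∧ F'.length = n
        ∧ (∀ u, u < n → (F'.getD u false = true ↔ (S0 u ∨ pvReach f s u))) := by
  intro fuel
  induction fuel with
  | zero =>
    intro k F cnt hk hfuel _ _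
    omega
  | succ fuel ih =>
    intro k F cnt hk hfuel hlen hchar
    have hku : f^[k] s < n := pvIter_lt hlt k s hs
    by_cases hkp : k = p
    · have hv : F.getD (f^[k] s) false = true := by
        rw [hchar _ hku]
        refine Or.inr ⟨0, by omega, ?_⟩
        simp only [Function.iterate_zero_apply]
        rw [hkp]; exact hfix.symm
      rw [pvWalkF_stop nxt fuel F _ cnt hv]
      refine ⟨F, by rw [hkp]; simp, hlen, ?_⟩
      intro u hu
      rw [hchar _ hu]
      constructor
      · rintro (h | ⟨j, hj, hju⟩)
        · exact Or.inl h
        · exact Or.inr ⟨j, hju⟩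
      · rintro (h | ⟨j, hju⟩)
        · exact Or.inl h
        · refine Or.inr ⟨j % p, by rw [hkp]; exact Nat.mod_lt _ hp, ?_⟩
          rw [← pvIter_mod hfix hp]; exact hju
    · have hklt : k < p := by omega
      have hv : F.getD (f^[k] s) false = false := by
        cases h : F.getD (f^[k] s) false
        · rfl
        · exfalso
          rcases (hchar _ hku).mp h with h1 | ⟨j, hj, hju⟩
          · exact hS0 k h1
          · have hb : k = j + (k - j) := by omega
            rw [hb, Function.iterate_add_apply] at hju
            have h2 := pvIter_cancel hlt hinj j s (f^[k - j] s)
              hs (pvIter_lt hlt _ s hs) hju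
            exact hmin (k - j) (by omega) (by omega) h2.symm
      rw [pvWalkF_step nxt fuel F _ cnt hv]
      have hnx : nxt.getD (f^[k] s) 0 = ((f^[k+1] s : Nat) : Int) := by
        rw [hnxt _ hku, Function.iterate_succ_apply']
      rw [hnx]
      have hsetlen : (F.set (f^[k] s) true).length = n := by simpa using hlen
      have hchar2 : ∀ u, u < n → ((F.set (f^[k] s) true).getD u false = true
          ↔ (S0 u ∨ ∃ j, j < k+1 ∧ f^[j] s = u)) := by
        intro u hu
        rw [pvGetD_set _ _ _ _ _ (by rw [hlen]; exact hku)]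
        by_cases he : f^[k] s = u
        · subst he
          simp only [if_pos rfl]
          constructor
          · intro _
            exact Or.inr ⟨k, by omega, rfl⟩
          · intro _
            rfl
        · rw [if_neg he, hchar _ hu]
          constructor
          · rintro (h | ⟨j, hj, hju⟩)
            · exact Or.inl h
            · exact Or.inr ⟨j, by omega, hju⟩
          · rintro (h | ⟨j, hj, hju⟩)
            · exact Or.inl h
            · have hjk : j ≠ k := fun hh => he (by rw [← hh]; exact hju)
              exact Or.inr ⟨j, by omega, hju⟩
      obtain ⟨F', hres, hlen', hchar'⟩ := ih (k+1) (F.set (f^[k] s) true) (cnt + 1)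
        (by omega) (by omega) hsetlen hchar2
      refine ⟨F', ?_, hlen', hchar'⟩
      rw [hres]
      have hc : cnt + 1 + ((p - (k+1) : Nat) : Int) = cnt + ((p - k : Nat) : Int) := by omega
      exact congrArg (Prod.mk F') hc

-- ---------- the two sweeps produce the same answer list ----------
lemma pvSweep_eq (grid : List String) (H W : Nat) :
    ∀ m, m ≤ 4 * W * H →
      ((List.range m).foldl (fun st s =>
          if st.1.getD s false then st
          else
            let w := pvWalkF ((List.range (4 * W * H)).map (fun s : Nat => pvStep grid H W (s : Int)))
              (4 * W * H + 1) st.1 (s : Int) 0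
            (w.1, st.2 ++ [w.2])) (List.replicate (4 * W * H) false, ([] : List Int))).1.length
          = 4 * W * H ∧
      (∀ u, u < 4 * W * H →
        (((List.range m).foldl (fun st s =>
          if st.1.getD s false then st
          else
            let w := pvWalkF ((List.range (4 * W * H)).map (fun s : Nat => pvStep grid H W (s : Int)))
              (4 * W * H + 1) st.1 (s : Int) 0
            (w.1, st.2 ++ [w.2])) (List.replicate (4 * W * H) false, ([] : List Int))).1.getD u false = true
          ↔ ∃ j, j < m ∧ pvReach (pvF grid H W) j u)) ∧
      ((List.range m).foldl (fun st s =>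
          if st.1.getD s false then st
          else
            let w := pvWalkF ((List.range (4 * W * H)).map (fun s : Nat => pvStep grid H W (s : Int)))
              (4 * W * H + 1) st.1 (s : Int) 0
            (w.1, st.2 ++ [w.2])) (List.replicate (4 * W * H) false, ([] : List Int))).2
        = (List.range m).foldl (fun ans (s : Nat) =>
            let w := pvLeadWalk grid H W (s : Int) (4 * W * H) (pvStep grid H W (s : Int)) 1
            if w.1 = (s : Int) then ans ++ [w.2] else ans) ([] : List Int) := by
  have hlt : ∀ s, s < 4 * W * H → pvF grid H W s < 4 * W * H := fun s hs => pvF_lt grid hs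
  have hinj : ∀ a b, a < 4 * W * H → b < 4 * W * H → pvF grid H W a = pvF grid H W b → a = b :=
    fun a b ha hb h => pvF_inj grid ha hb h
  have hstepc : ∀ u, u < 4 * W * H → pvStep grid H W (u : Int) = ((pvF grid H W u : Nat) : Int) :=
    fun u hu => pvStep_cast grid hu
  have hnxtD : ∀ u, u < 4 * W * H →
      ((List.range (4 * W * H)).map (fun s : Nat => pvStep grid H W (s : Int))).getD u 0
        = ((pvF grid H W u : Nat) : Int) := by
    intro u hu
    rw [PySem.List.getD_map_range _ _ _ _ hu]
    exact hstepc u hu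
  intro m
  induction m with
  | zero =>
    intro _
    refine ⟨by simp, ?_, rfl⟩
    intro u hu
    simp only [List.range_zero, List.foldl_nil]
    rw [List.getD_replicate _ hu]
    simp
  | succ m ih =>
    intro hm1
    have hmn : m < 4 * W * H := hm1
    obtain ⟨ihlen, ihchar, ihans⟩ := ih (by omega)
    simp only [List.range_succ, List.foldl_append, List.foldl_cons, List.foldl_nil] at *
    set f := pvF grid H W with hfdef
    set nxt := (List.range (4 * W * H)).map (fun s : Nat => pvStep grid H W (s : Int)) with hnxtdef
    set sF := (List.range m).foldl (fun st s =>
          if st.1.getD s false then st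
          else
            let w := pvWalkF nxt (4 * W * H + 1) st.1 (s : Int) 0
            (w.1, st.2 ++ [w.2])) (List.replicate (4 * W * H) false, ([] : List Int)) with hsF
    set aB := (List.range m).foldl (fun ans (s : Nat) =>
            let w := pvLeadWalk grid H W (s : Int) (4 * W * H) (pvStep grid H W (s : Int)) 1
            if w.1 = (s : Int) then ans ++ [w.2] else ans) ([] : List Int) with haB
    -- the period of m and the leader-walk stopping index K
    have hper := pvPer_ex hlt hinj hmn
    have hp0 := (Nat.find_spec hper).1
    have hpfix := (Nat.find_spec hper).2
    have hpmin : ∀ j, 0 < j → j < Nat.find hper → f^[j] m ≠ m :=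
      fun j hj hjp hne => Nat.find_min hper hjp ⟨hj, hne⟩
    have hpn : Nat.find hper ≤ 4 * W * H := pvPer_le hlt hinj hmn hp0 hpfix hpmin
    have hQex : ∃ j, 0 < j ∧ f^[j] m ≤ m :=
      ⟨Nat.find hper, hp0, le_of_eq hpfix⟩
    have hK1 := (Nat.find_spec hQex).1
    have hKle := (Nat.find_spec hQex).2
    have hKmin : ∀ j, 0 < j → j < Nat.find hQex → m < f^[j] m := by
      intro j hj hjK
      have h := Nat.find_min hQex hjK
      rcases Nat.lt_or_ge m (f^[j] m) with h1 | h1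
      · exact h1
      · exact absurd ⟨hj, h1⟩ h
    have hKp : Nat.find hQex ≤ Nat.find hper := Nat.find_min' hQex ⟨hp0, le_of_eq hpfix⟩
    have hKfix := pvKfix_iff hlt hinj hmn hQex
    -- B's walk at start m evaluates to (f^[K] m, K)
    have hwalk : pvLeadWalk grid H W (m : Int) (4 * W * H) (pvStep grid H W (m : Int)) 1
        = (((f^[Nat.find hQex] m : Nat) : Int), ((Nat.find hQex : Nat) : Int)) := by
      have h1 : pvStep grid H W (m : Int) = ((f^[1] m : Nat) : Int) := by
        rw [hstepc m hmn, Function.iterate_one]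
      rw [h1]
      have h2 := pvLeadWalk_spec grid H W (4 * W * H) f hstepc hlt m hmn
        (Nat.find hQex) hK1 hKle hKmin (4 * W * H) 1 one_pos hK1 (by omega)
      simpa using h2
    by_cases hvis : ∃ j, j < m ∧ pvReach f j m
    · -- m was already visited: both sides skip
      have hg : sF.1.getD m false = true := (ihchar m hmn).mpr hvis
      have hKne : f^[Nat.find hQex] m ≠ m := by
        intro heq
        obtain ⟨j, hj, hr⟩ := hvis
        exact (hKfix.mp heq) ⟨j, hj, pvReach_symm hlt hinj (by omega) hr⟩
      rw [if_pos hg, hwalk, if_neg (by dsimp only; exact_mod_cast hKne)]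
      refine ⟨ihlen, ?_, ihans⟩
      intro u hu
      rw [ihchar u hu]
      constructor
      · rintro ⟨j, hj, hr⟩
        exact ⟨j, by omega, hr⟩
      · rintro ⟨j, hj, hr⟩
        rcases Nat.lt_or_ge j m with h1 | h1
        · exact ⟨j, h1, hr⟩
        · have hjm : j = m := by omega
          subst hjm
          obtain ⟨j0, hj0, hr0⟩ := hvis
          exact ⟨j0, hj0, pvReach_trans hr0 hr⟩
    · -- m is the least state of a fresh cycle: both sides append its length
      have hg : sF.1.getD m false = false := by
        cases h : sF.1.getD m false
        · rfl
        · exact absurd ((ihchar m hmn).mp h) hvis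
      have hS0 : ∀ a, ¬ (sF.1.getD (f^[a] m) false = true) := by
        intro a h
        have hu : f^[a] m < 4 * W * H := pvIter_lt hlt a m hmn
        obtain ⟨j, hj, hr⟩ := (ihchar _ hu).mp h
        exact hvis ⟨j, hj, pvReach_trans hr (pvReach_symm hlt hinj hmn ⟨a, rfl⟩)⟩
      obtain ⟨F', hres, hlen', hchar'⟩ := pvWalkF_spec f nxt hnxtD hlt hinj m hmn
        (Nat.find hper) hp0 hpfix hpmin (fun u => sF.1.getD u false = true) hS0
        (4 * W * H + 1) 0 sF.1 0 (by omega) (by omega) ihlen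
        (by
          intro u hu
          constructor
          · intro h
            exact Or.inl h
          · rintro (h | ⟨j, hj, _⟩)
            · exact h
            · omega)
      simp only [Function.iterate_zero_apply, Nat.sub_zero, zero_add] at hres
      have hKfixEq : f^[Nat.find hQex] m = m := by
        apply hKfix.mpr
        rintro ⟨j, hj, hr⟩
        exact hvis ⟨j, hj, pvReach_symm hlt hinj hmn hr⟩
      have hKeqp : Nat.find hQex = Nat.find hper :=
        le_antisymm hKp (Nat.find_min' hper ⟨hK1, hKfixEq⟩)
      rw [if_neg (by rw [hg]; exact Bool.false_ne_true), hwalk,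
        if_pos (by dsimp only; exact_mod_cast hKfixEq)]
      dsimp only
      rw [hres]
      refine ⟨hlen', ?_, by rw [ihans, hKeqp]⟩
      intro u hu
      rw [hchar' u hu]
      constructor
      · rintro (h | hr)
        · obtain ⟨j, hj, hrj⟩ := (ihchar u hu).mp h
          exact ⟨j, by omega, hrj⟩
        · exact ⟨m, by omega, hr⟩
      · rintro ⟨j, hj, hr⟩
        rcases Nat.lt_or_ge j m with h1 | h1
        · exact Or.inl ((ihchar u hu).mpr ⟨j, h1, hr⟩)
        · have hjm : j = m := by omega
          subst hjm
          exact Or.inr hr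

-- ===== VERDICT (by name: the statement is the Claim_ definition above) =====
theorem solution_spec : Claim_equal_solution := by
  intro grid _ _
  show solution grid = solution_alt grid
  rw [pvA_eq_flat]
  unfold pvFlat solution_alt
  dsimp only
  have h := pvSweep_eq grid grid.length ((grid.headD "").toList.length)
    (4 * ((grid.headD "").toList.length) * grid.length) le_rfl
  exact congrArg (fun l => PySem.List.sorted l (fun v => v) false) h.2.2
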